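-- pv_equiv track=rewrite | github.com/Laurens7734/MastermindAI | MastermindEnv.py | findWrongPositions
-- ===== SOURCE A (Python) =====
-- def findWrongPositions(remainingInCode,remainingInGuess):
--     numberOfMatches = 0
--     for letter in remainingInGuess:
--         for i in range(len(remainingInCode)):
--             if remainingInCode[i] == letter:
--                 numberOfMatches += 1
--                 del remainingInCode[i]
--                 break
--     return numberOfMatches
-- ===== SOURCE B (Python) =====
-- def findWrongPositions(remainingInCode, remainingInGuess):
--     a = sorted(remainingInCode)
--     b = sorted(remainingInGuess)
--     i = j = 0
--     numberOfMatches = 0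
--     while i < len(a) and j < len(b):
--         if a[i] < b[j]:
--             i += 1
--         elif a[i] > b[j]:
--             j += 1
--         else:
--             numberOfMatches += 1
--             i += 1
--             j += 1
--     return numberOfMatches
-- ===== Notes on version B (the rewrite author's own statement) =====
-- stated objective: faster
-- what changed: Replaced the nested scan-and-delete over the code list (and its in-place mutation) with sorting copies of both lists once and counting equal elements in a single two-pointer merge pass; equivalence is about the return value only (A empties matches out of remainingInCode in place, B does not mutate).
import Mathlib
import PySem

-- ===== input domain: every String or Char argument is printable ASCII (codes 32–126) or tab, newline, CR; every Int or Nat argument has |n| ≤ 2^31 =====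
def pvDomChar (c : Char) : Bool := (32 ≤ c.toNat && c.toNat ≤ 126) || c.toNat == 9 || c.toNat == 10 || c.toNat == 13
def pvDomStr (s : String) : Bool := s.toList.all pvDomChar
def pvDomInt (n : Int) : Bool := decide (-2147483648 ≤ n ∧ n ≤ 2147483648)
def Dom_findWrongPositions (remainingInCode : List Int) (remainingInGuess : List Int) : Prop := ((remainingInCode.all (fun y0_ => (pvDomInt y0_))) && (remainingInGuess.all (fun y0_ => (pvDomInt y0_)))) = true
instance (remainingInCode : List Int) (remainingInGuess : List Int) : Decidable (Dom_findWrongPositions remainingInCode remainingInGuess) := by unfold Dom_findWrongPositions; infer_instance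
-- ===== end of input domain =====

-- B replaces A's nested scan-and-delete with sort + one two-pointer merge pass (asymptotically
-- faster); equivalence is about the RETURN value only: A empties matched letters out of
-- remainingInCode in place, B does not mutate its arguments.


-- ===== PORT A =====
-- inner 'for i in range(len(code)): if code[i] == letter: del code[i]; break' —
-- scan left to right, delete the first match (some newCode) or fall through (none)
def pvScanDelete (code : List Int) (letter : Int) : Option (List Int) :=
  match code with
  | [] => none
  | x :: xs => if x = letter then some xs else (pvScanDelete xs letter).map (x :: ·)

def findWrongPositions (remainingInCode : List Int) (remainingInGuess : List Int) : Int :=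
  (remainingInGuess.foldl
    (fun (st : List Int × Int) letter =>
      match pvScanDelete st.1 letter with
      | some newCode => (newCode, st.2 + 1)
      | none => st)
    (remainingInCode, 0)).2

-- ===== PORT B =====
-- the two-pointer while loop over the sorted copies, consuming from the front
def pvMergeCount (a : List Int) (b : List Int) : Int :=
  match a, b with
  | [], _ => 0
  | _, [] => 0
  | x :: a', y :: b' =>
    if x < y then pvMergeCount a' (y :: b')
    else if y < x then pvMergeCount (x :: a') b'
    else 1 + pvMergeCount a' b'

def findWrongPositions_alt (remainingInCode : List Int) (remainingInGuess : List Int) : Int :=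
  pvMergeCount (PySem.List.sorted remainingInCode (fun x => x) false)
               (PySem.List.sorted remainingInGuess (fun x => x) false)

-- ===== PRECONDITION & SPEC =====
def Spec_findWrongPositions (remainingInCode : List Int) (remainingInGuess : List Int) (out : Int) : Prop := out = findWrongPositions_alt remainingInCode remainingInGuess
instance (remainingInCode : List Int) (remainingInGuess : List Int) (out : Int) : Decidable (Spec_findWrongPositions remainingInCode remainingInGuess out) := by unfold Spec_findWrongPositions; infer_instance

-- ===== CLAIM (what is proved, stated in full; the proofs are below) =====
def Claim_equal_findWrongPositions : Prop := ∀ (remainingInCode : List Int) (remainingInGuess : List Int), Dom_findWrongPositions remainingInCode remainingInGuess → Spec_findWrongPositions remainingInCode remainingInGuess (findWrongPositions remainingInCode remainingInGuess)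

-- ===== LEMMAS AND PROOFS =====

theorem pvScanDelete_eq (code : List Int) (letter : Int) :
    pvScanDelete code letter = if letter ∈ code then some (code.erase letter) else none := by
  induction code with
  | nil => simp [pvScanDelete]
  | cons x xs ih =>
    by_cases hx : x = letter
    · subst hx; simp [pvScanDelete]
    · simp only [pvScanDelete, if_neg hx, ih, List.mem_cons, List.erase_cons,
        if_neg (by simpa [eq_comm] using hx)]
      by_cases hm : letter ∈ xs <;> simp [hm, hx, Ne.symm hx, beq_iff_eq]

-- A's fold computes the multiset-intersection cardinality
theorem pvFoldA_eq (guess : List Int) (code : List Int) (acc : Int) :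
    (guess.foldl
      (fun (st : List Int × Int) letter =>
        match pvScanDelete st.1 letter with
        | some newCode => (newCode, st.2 + 1)
        | none => st)
      (code, acc)).2
    = acc + Multiset.card ((code : Multiset Int) ∩ (guess : Multiset Int)) := by
  induction guess generalizing code acc with
  | nil => simp
  | cons l t ih =>
    have step :
        (match pvScanDelete code l with
          | some newCode => (newCode, acc + 1)
          | none => ((code, acc) : List Int × Int))
        = if l ∈ code then (code.erase l, acc + 1) else (code, acc) := by
      rw [pvScanDelete_eq]
      by_cases hl : l ∈ code <;> simp [hl]
    simp only [List.foldl_cons]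
    rw [step]
    by_cases hl : l ∈ code
    · have h1 : ((code : Multiset Int) ∩ (↑(l :: t) : Multiset Int))
          = l ::ₘ ((code.erase l : List Int) : Multiset Int) ∩ (t : Multiset Int) := by
        rw [Multiset.inter_comm]
        have h2 : ((↑(l :: t) : Multiset Int)) = l ::ₘ (t : Multiset Int) := by simp
        rw [h2, Multiset.cons_inter_of_pos _ (by simpa using hl)]
        rw [Multiset.inter_comm]
        congr 1
      rw [if_pos hl, ih, h1]
      push_cast [Multiset.card_cons]
      ring
    · have h1 : ((code : Multiset Int) ∩ (↑(l :: t) : Multiset Int))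
          = (code : Multiset Int) ∩ (t : Multiset Int) := by
        rw [Multiset.inter_comm]
        have h2 : ((↑(l :: t) : Multiset Int)) = l ::ₘ (t : Multiset Int) := by simp
        rw [h2, Multiset.cons_inter_of_neg _ (by simpa using hl), Multiset.inter_comm]
      rw [if_neg hl, ih, h1]

-- B's merge pass computes the same cardinality on sorted inputs
theorem pvMergeCount_eq (a : List Int) :
    ∀ b : List Int, a.Pairwise (· ≤ ·) → b.Pairwise (· ≤ ·) →
    pvMergeCount a b = Multiset.card ((a : Multiset Int) ∩ (b : Multiset Int)) := by
  induction a with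
  | nil => intro b _ _; simp [pvMergeCount]
  | cons x a' iha =>
    intro b ha hb
    induction b with
    | nil => simp [pvMergeCount]
    | cons y b' ihb =>
      have ha' : a'.Pairwise (· ≤ ·) := ha.tail
      have hb' : b'.Pairwise (· ≤ ·) := hb.tail
      rcases lt_trichotomy x y with hxy | hxy | hxy
      · -- x < y : x is below everything in y :: b', so it cannot match
        have hx_not : x ∉ (y :: b') := by
          intro hmem
          rcases List.mem_cons.mp hmem with h | h
          · omega
          · have := (List.pairwise_cons.mp hb).1 x h
            omega
        have h1 : ((↑(x :: a') : Multiset Int)) ∩ (↑(y :: b') : Multiset Int)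
            = ((a' : Multiset Int)) ∩ (↑(y :: b') : Multiset Int) := by
          have e1 : ((↑(x :: a') : Multiset Int)) = x ::ₘ (a' : Multiset Int) := by simp
          rw [e1, Multiset.cons_inter_of_neg _ (by simpa using hx_not)]
        rw [pvMergeCount, if_pos hxy, iha (y :: b') ha' hb, h1]
      · -- x = y : a match, consume both
        subst hxy
        have h1 : ((↑(x :: a') : Multiset Int)) ∩ (↑(x :: b') : Multiset Int)
            = x ::ₘ ((a' : Multiset Int)) ∩ ((b' : Multiset Int)) := by
          have e1 : ((↑(x :: a') : Multiset Int)) = x ::ₘ (a' : Multiset Int) := by simp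
          have e2 : ((↑(x :: b') : Multiset Int)) = x ::ₘ (b' : Multiset Int) := by simp
          rw [e1, e2, Multiset.cons_inter_of_pos _ (by simp)]
          simp
        rw [pvMergeCount, if_neg (lt_irrefl x), if_neg (lt_irrefl x),
          iha b' ha' hb', h1]
        push_cast [Multiset.card_cons]
        ring
      · -- y < x : y is below everything in x :: a', so it cannot match
        have hy_not : y ∉ (x :: a') := by
          intro hmem
          rcases List.mem_cons.mp hmem with h | h
          · omega
          · have := (List.pairwise_cons.mp ha).1 y h
            omega
        have h1 : ((↑(x :: a') : Multiset Int)) ∩ (↑(y :: b') : Multiset Int)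
            = ((↑(x :: a') : Multiset Int)) ∩ ((b' : Multiset Int)) := by
          rw [Multiset.inter_comm]
          have e1 : ((↑(y :: b') : Multiset Int)) = y ::ₘ (b' : Multiset Int) := by simp
          rw [e1, Multiset.cons_inter_of_neg _ (by simpa using hy_not),
            Multiset.inter_comm]
        rw [pvMergeCount, if_neg (by omega), if_pos hxy, ihb hb', h1]

-- ===== VERDICT (by name: the statement is the Claim_ definition above) =====
theorem findWrongPositions_spec : Claim_equal_findWrongPositions := by
  intro code guess _
  unfold Spec_findWrongPositions findWrongPositions findWrongPositions_alt
  rw [pvFoldA_eq, pvMergeCount_eq _ _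
    (by simpa using PySem.List.sorted_pairwise (xs := code) (key := fun x => x))
    (by simpa using PySem.List.sorted_pairwise (xs := guess) (key := fun x => x))]
  have hc : ((PySem.List.sorted code (fun x => x) false : List Int) : Multiset Int)
      = (code : Multiset Int) :=
    Quot.sound (PySem.List.sorted_perm (xs := code) (key := fun x => x) (rev := false))
  have hg : ((PySem.List.sorted guess (fun x => x) false : List Int) : Multiset Int)
      = (guess : Multiset Int) :=
    Quot.sound (PySem.List.sorted_perm (xs := guess) (key := fun x => x) (rev := false))
  rw [hc, hg]
  ring
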